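-- pv_equiv track=rewrite | github.com/Byxis/IG3-Opti | TP2/TP2.py | base
-- ===== SOURCE A (Python) =====
-- def base(Ts):
--     B = []
--     for i in range(0, len(Ts[0])-1):
--         onePlacement = -1
--         isOnePlaced = False
--         j = 0
--         while j < len(Ts) and Ts[j][i] in [0, 1]:
--             if Ts[j][i] == 1 and not isOnePlaced:
--                 onePlacement = j
--                 isOnePlaced = True
--             elif Ts[j][i] == 1 and isOnePlaced:
--                 onePlacement = -1
--             j += 1
--
--         if(j < len(Ts)):
--             onePlacement = -1
--
--         B.append(onePlacement)
--     return B
-- ===== SOURCE B (Python) =====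
-- def base(Ts):
--     m = len(Ts[0]) - 1
--     valid = [True] * m
--     count = [0] * m
--     first = [-1] * m
--     for j, row in enumerate(Ts):
--         for i in range(m):
--             v = row[i]
--             if not (v == 0 or v == 1):
--                 valid[i] = False
--             elif v == 1:
--                 count[i] += 1
--                 if count[i] == 1:
--                     first[i] = j
--     return [first[i] if valid[i] and count[i] == 1 else -1 for i in range(m)]
-- ===== Notes on version B (the rewrite author's own statement) =====
-- stated objective: alternative
-- what changed: A's column-outer scan with a per-column while loop is replaced by one row-major pass maintaining per-column accumulators (validity flag, one-count, first-one row index), finalized in a single comprehension.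
-- outside the precondition, e.g. on base([[2, 3], []]): A returns [-1], B raises IndexError
import Mathlib
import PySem

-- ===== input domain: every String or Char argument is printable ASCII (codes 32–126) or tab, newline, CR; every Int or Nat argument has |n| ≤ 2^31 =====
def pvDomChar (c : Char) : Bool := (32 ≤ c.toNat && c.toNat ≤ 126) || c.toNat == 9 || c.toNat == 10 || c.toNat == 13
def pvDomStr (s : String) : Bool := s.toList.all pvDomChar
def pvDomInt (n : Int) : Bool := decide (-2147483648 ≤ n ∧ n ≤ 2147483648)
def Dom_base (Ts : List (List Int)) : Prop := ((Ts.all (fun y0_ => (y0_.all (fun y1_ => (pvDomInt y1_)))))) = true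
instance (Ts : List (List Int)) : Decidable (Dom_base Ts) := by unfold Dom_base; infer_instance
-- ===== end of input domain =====

-- B replaces A's column-outer nested scan by one row-major pass with per-column
-- accumulators (validity flag, one-count, first-one index); same asymptotic cost.

-- ===== PORT A =====
-- the while loop of A: j is the row cursor, op/placed the loop state; a missing
-- entry (only reachable outside Pre_base, where Python raises) stops the loop.
def baseWhile (Ts : List (List Int)) (i j : Nat) (op : Int) (placed : Bool) : Int :=
  if _h : j < Ts.length then
    match (Ts.getD j [])[i]? with
    | some v =>
      if v = 0 ∨ v = 1 then
        if v = 1 ∧ placed = false then baseWhile Ts i (j+1) (j : Int) true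
        else if v = 1 then baseWhile Ts i (j+1) (-1) true
        else baseWhile Ts i (j+1) op placed
      else -1                              -- loop left with j < len(Ts): onePlacement := -1
    | none => -1
  else op
termination_by Ts.length - j

def base (Ts : List (List Int)) : List Int :=
  (List.range ((Ts.headD []).length - 1)).map (fun i => baseWhile Ts i 0 (-1) false)

-- ===== PORT B =====
-- body of B's inner loop: update one column accumulator (valid, count, first) with value v at row j
def altStep (j : Nat) (v : Int) (st : Bool × Nat × Int) : Bool × Nat × Int :=
  if ¬(v = 0 ∨ v = 1) then (false, st.2.1, st.2.2)
  else if v = 1 then (st.1, st.2.1 + 1, if st.2.1 + 1 = 1 then (j : Int) else st.2.2)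
  else st

-- one row of B's outer loop: update every column accumulator
def altRow (st : List (Bool × Nat × Int)) (rj : List Int × Nat) : List (Bool × Nat × Int) :=
  st.zipIdx.map (fun si => altStep rj.2 (rj.1.getD si.2 0) si.1)

def base_alt (Ts : List (List Int)) : List Int :=
  (Ts.zipIdx.foldl altRow
      (List.replicate ((Ts.headD []).length - 1) (true, 0, (-1 : Int)))).map
    (fun st => if st.1 ∧ st.2.1 = 1 then st.2.2 else -1)

-- ===== PRECONDITION & SPEC =====
-- Pre_base excludes the empty matrix (A raises IndexError on Ts[0]) and matrices with a
-- row shorter than len(Ts[0])-1: there Python indexing can raise, and on the ragged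
-- inputs where A's while loop happens to stop before reaching a short row (A returns)
-- B's full row-major scan raises IndexError, so those inputs are excluded too.
def Pre_base (Ts : List (List Int)) : Prop :=
  Ts ≠ [] ∧ ∀ r ∈ Ts, (Ts.headD []).length - 1 ≤ r.length
instance (Ts : List (List Int)) : Decidable (Pre_base Ts) := by unfold Pre_base; infer_instance

def pvWitness_base : List (List Int) := [[1, 0, 5], [0, 1, 7]]

def Spec_base (Ts : List (List Int)) (out : List Int) : Prop := out = base_alt Ts
instance (Ts : List (List Int)) (out : List Int) : Decidable (Spec_base Ts out) := by unfold Spec_base; infer_instance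

-- ===== CLAIM (what is proved, stated in full; the proofs are below) =====
def Claim_equal_base : Prop := ∀ (Ts : List (List Int)), Dom_base Ts → Pre_base Ts → Spec_base Ts (base Ts)

-- ===== LEMMAS AND PROOFS =====

-- proof-side model of A's while loop over a column (list of entries), starting at row j
def wA : List Int → Nat → Int → Bool → Int
  | [], _, op, _ => op
  | v :: vs, j, op, placed =>
    if v = 0 ∨ v = 1 then
      if v = 1 ∧ placed = false then wA vs (j+1) (j : Int) true
      else if v = 1 then wA vs (j+1) (-1) true
      else wA vs (j+1) op placed
    else -1

-- proof-side per-column run of B's accumulator over a column, starting at row j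
def sB : List Int → Nat → (Bool × Nat × Int) → (Bool × Nat × Int)
  | [], _, st => st
  | v :: vs, j, st => sB vs (j+1) (altStep j v st)

lemma baseWhile_eq_wA (Ts : List (List Int)) (i : Nat) (Hi : ∀ r ∈ Ts, i < r.length) :
    ∀ n j op placed, Ts.length - j = n →
      baseWhile Ts i j op placed = wA ((Ts.drop j).map (fun r => r.getD i 0)) j op placed := by
  intro n
  induction n with
  | zero =>
    intro j op placed h
    have hj : ¬ j < Ts.length := by omega
    rw [baseWhile]
    simp [hj, List.drop_eq_nil_of_le (by omega : Ts.length ≤ j), wA]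
  | succ n ih =>
    intro j op placed h
    have hj : j < Ts.length := by omega
    have hir : i < (Ts[j]).length := Hi _ (List.getElem_mem hj)
    have hv : (Ts.getD j [])[i]? = some ((Ts[j]).getD i 0) := by
      rw [List.getD_eq_getElem?_getD, List.getElem?_eq_getElem hj]
      simp [List.getElem?_eq_getElem hir]
    rw [baseWhile, List.drop_eq_getElem_cons hj]
    simp only [hj, dif_pos, hv, List.map_cons, wA]
    split_ifs <;> first
      | rfl
      | exact ih (j+1) _ _ (by omega)

lemma altStep_fst_false (j : Nat) (v : Int) (a : Nat) (b : Int) :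
    (altStep j v (false, a, b)).1 = false := by
  unfold altStep; split_ifs <;> rfl

lemma sB_false (c : List Int) : ∀ j a b, (sB c j (false, a, b)).1 = false := by
  induction c with
  | nil => intro j a b; rfl
  | cons v vs ih =>
    intro j a b
    rw [sB]
    have h := altStep_fst_false j v a b
    rcases hst : altStep j v (false, a, b) with ⟨va, cn, fs⟩
    rw [hst] at h; subst h
    exact ih (j+1) cn fs

lemma wA_eq_sB (c : List Int) :
    ∀ j cnt (first : Int),
      wA c j (if cnt = 1 then first else -1) (cnt != 0) =
        (fun st => if st.1 = true ∧ st.2.1 = 1 then st.2.2 else -1) (sB c j (true, cnt, first)) := by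
  induction c with
  | nil =>
    intro j cnt first
    simp [wA, sB]
  | cons v vs ih =>
    intro j cnt first
    rw [wA, sB]
    by_cases hv : v = 0 ∨ v = 1
    · rw [if_pos hv]
      by_cases h1 : v = 1
      · subst h1
        rcases Nat.eq_zero_or_pos cnt with hc | hc
        · subst hc
          have : altStep j 1 (true, 0, first) = (true, 1, (j : Int)) := by
            simp [altStep]
          rw [this]
          simpa using ih (j+1) 1 (j : Int)
        · have hne : cnt ≠ 0 := by omega
          have hstep : altStep j 1 (true, cnt, first) =
              (true, cnt + 1, if cnt + 1 = 1 then (j : Int) else first) := by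
            simp [altStep]
          rw [hstep]
          have h2 : cnt + 1 ≠ 1 := by omega
          have hb1 : (cnt != 0) = true := by simpa using hne
          have hIH := ih (j+1) (cnt+1) (if cnt + 1 = 1 then (j : Int) else first)
          rw [if_neg h2] at hIH
          simp only [show ((cnt + 1 : Nat) != 0) = true from by simp] at hIH
          simpa [hb1] using hIH
      · have h0 : v = 0 := by tauto
        subst h0
        have : altStep j 0 (true, cnt, first) = (true, cnt, first) := by simp [altStep]
        rw [this]
        simpa [h1] using ih (j+1) cnt first
    · rw [if_neg hv]
      have : altStep j v (true, cnt, first) = (false, cnt, first) := by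
        simp [altStep, hv]
      rw [this]
      have := sB_false vs (j+1) cnt first
      rcases hst : sB vs (j+1) (false, cnt, first) with ⟨va, cn, fs⟩
      rw [hst] at this; subst this
      simp

lemma replicate_eq_range_map {β : Type} (m : Nat) (x : β) :
    List.replicate m x = (List.range m).map (fun _ => x) := by
  simp

lemma zipIdx_map_range {β : Type} (m : Nat) (g : Nat → β) :
    ((List.range m).map g).zipIdx = (List.range m).map (fun k => (g k, k)) := by
  apply List.ext_getElem
  · simp
  · intro k h1 h2
    simp [List.getElem_zipIdx]

lemma foldl_altRow_range (rs : List (List Int × Nat)) (m : Nat) :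
    ∀ g : Nat → Bool × Nat × Int,
      rs.foldl altRow ((List.range m).map g) =
        (List.range m).map
          (fun k => rs.foldl (fun s rj => altStep rj.2 (rj.1.getD k 0) s) (g k)) := by
  induction rs with
  | nil => intro g; rfl
  | cons r rs ih =>
    intro g
    have hrow : altRow ((List.range m).map g) r =
        (List.range m).map (fun k => altStep r.2 (r.1.getD k 0) (g k)) := by
      unfold altRow
      rw [zipIdx_map_range, List.map_map]
      rfl
    simp only [List.foldl_cons, hrow, ih]

lemma foldl_col_eq_sB (Ts : List (List Int)) (k : Nat) :
    ∀ n s, (Ts.zipIdx n).foldl (fun s rj => altStep rj.2 (rj.1.getD k 0) s) s =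
      sB (Ts.map (fun r => r.getD k 0)) n s := by
  induction Ts with
  | nil => intro n s; rfl
  | cons r rs ih =>
    intro n s
    rw [List.zipIdx_cons, List.foldl_cons, ih, List.map_cons, sB]

-- ===== VERDICT (by name: the statement is the Claim_ definition above) =====
theorem base_spec : Claim_equal_base := by
  intro Ts _hDom hPre
  unfold Spec_base base base_alt
  rw [replicate_eq_range_map, foldl_altRow_range, List.map_map]
  apply List.map_congr_left
  intro i hi
  rw [List.mem_range] at hi
  have Hi : ∀ r ∈ Ts, i < r.length := fun r hr => lt_of_lt_of_le hi (hPre.2 r hr)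
  rw [baseWhile_eq_wA Ts i Hi (Ts.length) 0 (-1) false (by omega), List.drop_zero]
  simp only [Function.comp_apply]
  rw [foldl_col_eq_sB]
  simpa using wA_eq_sB (Ts.map (fun r => r.getD i 0)) 0 0 (-1)
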